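-- pv_equiv track=rewrite | github.com/Henrique-zoo/APC | Nível 2/1136 - Bingo!.py | pode_anunciar_todos_numeros
-- ===== SOURCE A (Python) =====
-- def pode_anunciar_todos_numeros(N, B, bolas):
--     bolas.sort()
--     numeros_anunciados = set()
--     for i in range(B):
--         for j in range(i, B):
--             diferenca = abs(bolas[i] - bolas[j])
--             numeros_anunciados.add(diferenca)
--     for numero in range(N + 1):
--         if numero not in numeros_anunciados:
--             return 'N'
--     return 'Y'
-- ===== SOURCE B (Python) =====
-- def tem_diferenca(bolas, B, d):
--     # two pointers over the sorted balls: is d a difference bolas[j] - bolas[i]?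
--     j = 0
--     for i in range(B):
--         if j < i:
--             j = i
--         while j < B and bolas[j] - bolas[i] < d:
--             j += 1
--         if j < B and bolas[j] - bolas[i] == d:
--             return True
--     return False
--
-- def pode_anunciar_todos_numeros(N, B, bolas):
--     bolas.sort()
--     for d in range(N + 1):
--         if not tem_diferenca(bolas, B, d):
--             return 'N'
--     return 'Y'
-- ===== Notes on version B (the rewrite author's own statement) =====
-- stated objective: alternative
-- what changed: Instead of materialising the set of all O(B^2) pairwise absolute differences and then scanning 0..N, B sorts the balls and, for each required number d, runs a two-pointer sweep over the sorted array to decide whether d occurs as a difference, exiting at the first missing number; Pre_ excludes only the inputs where A raises IndexError (B larger than the number of balls).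
import Mathlib
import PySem

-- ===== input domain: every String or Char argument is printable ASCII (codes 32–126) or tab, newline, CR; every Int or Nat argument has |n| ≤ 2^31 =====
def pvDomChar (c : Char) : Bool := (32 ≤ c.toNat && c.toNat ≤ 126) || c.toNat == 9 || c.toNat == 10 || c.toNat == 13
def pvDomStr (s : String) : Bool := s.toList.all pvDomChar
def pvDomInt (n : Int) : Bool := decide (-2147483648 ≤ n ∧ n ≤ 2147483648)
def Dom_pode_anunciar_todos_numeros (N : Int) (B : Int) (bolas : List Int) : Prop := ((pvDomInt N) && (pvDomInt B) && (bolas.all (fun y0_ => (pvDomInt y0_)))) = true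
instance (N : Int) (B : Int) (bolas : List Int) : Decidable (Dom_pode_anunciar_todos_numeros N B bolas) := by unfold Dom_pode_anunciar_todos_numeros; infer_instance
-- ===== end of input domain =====

-- B replaces A's O(B^2) all-pairs difference set by a per-number two-pointer sweep over the
-- sorted balls with early exit (objective: alternative algorithm). Both Pythons sort `bolas`
-- in place; the equivalence proved here is about the return value.

-- ===== PORT A =====
-- 'for numero in range(N + 1): if numero not in anunc: return "N"' / final 'return "Y"'
def pvCheckA (anunc : PySem.Set Int) : Nat → Int → String
  | 0, _ => "Y"
  | fuel + 1, d => if PySem.Set.contains anunc d then pvCheckA anunc fuel (d + 1) else "N"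

def pode_anunciar_todos_numeros (N : Int) (B : Int) (bolas : List Int) : String :=
  let s := PySem.List.sorted bolas (fun x => x) false
  let anunc := (PySem.List.pyRange 0 B 1).foldl
      (fun acc i => (PySem.List.pyRange i B 1).foldl
        (fun acc2 j => PySem.Set.add acc2 (|PySem.List.pyGetD s i 0 - PySem.List.pyGetD s j 0|)) acc)
      PySem.Set.empty
  pvCheckA anunc (N + 1).toNat 0

-- ===== PORT B =====
-- 'while j < B and bolas[j] - bolas[i] < d: j += 1'  (fuel (B - j).toNat suffices: j grows by 1)
def pvWhileB (s : List Int) (B d x : Int) : Nat → Int → Int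
  | 0, j => j
  | fuel + 1, j =>
    if j < B ∧ PySem.List.pyGetD s j 0 - x < d then pvWhileB s B d x fuel (j + 1) else j

-- 'for i in range(B): if j < i: j = i; <while>; if j < B and bolas[j] - bolas[i] == d: return True'
def pvTemGo (s : List Int) (B d : Int) : List Int → Int → Bool
  | [], _ => false
  | i :: rest, j =>
    let j1 := if j < i then i else j
    let j2 := pvWhileB s B d (PySem.List.pyGetD s i 0) (B - j1).toNat j1
    if j2 < B ∧ PySem.List.pyGetD s j2 0 - PySem.List.pyGetD s i 0 = d then true
    else pvTemGo s B d rest j2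

def pvTem (s : List Int) (B d : Int) : Bool := pvTemGo s B d (PySem.List.pyRange 0 B 1) 0

-- 'for d in range(N + 1): if not tem_diferenca(bolas, B, d): return "N"' / 'return "Y"'
def pvCheckB (s : List Int) (B : Int) : Nat → Int → String
  | 0, _ => "Y"
  | fuel + 1, d => if pvTem s B d then pvCheckB s B fuel (d + 1) else "N"

def pode_anunciar_todos_numeros_alt (N : Int) (B : Int) (bolas : List Int) : String :=
  let s := PySem.List.sorted bolas (fun x => x) false
  pvCheckB s B (N + 1).toNat 0

-- ===== PRECONDITION & SPEC =====
-- Pre_ excludes exactly the inputs on which A raises IndexError (B larger than the number of balls).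
def Pre_pode_anunciar_todos_numeros (N : Int) (B : Int) (bolas : List Int) : Prop :=
  B ≤ (bolas.length : Int)
instance (N : Int) (B : Int) (bolas : List Int) : Decidable (Pre_pode_anunciar_todos_numeros N B bolas) := by unfold Pre_pode_anunciar_todos_numeros; infer_instance

def pvWitness_pode_anunciar_todos_numeros : Int × Int × List Int := (1, 2, [3, 4])

def Spec_pode_anunciar_todos_numeros (N : Int) (B : Int) (bolas : List Int) (out : String) : Prop := out = pode_anunciar_todos_numeros_alt N B bolas
instance (N : Int) (B : Int) (bolas : List Int) (out : String) : Decidable (Spec_pode_anunciar_todos_numeros N B bolas out) := by unfold Spec_pode_anunciar_todos_numeros; infer_instance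

-- ===== CLAIM (what is proved, stated in full; the proofs are below) =====
def Claim_equal_pode_anunciar_todos_numeros : Prop := ∀ (N : Int) (B : Int) (bolas : List Int), Dom_pode_anunciar_todos_numeros N B bolas → Pre_pode_anunciar_todos_numeros N B bolas → Spec_pode_anunciar_todos_numeros N B bolas (pode_anunciar_todos_numeros N B bolas)

-- ===== LEMMAS AND PROOFS =====

-- the while loop only moves the pointer forward
lemma pvWhileB_ge (s : List Int) (B d x : Int) :
    ∀ (fuel : Nat) (j : Int), j ≤ pvWhileB s B d x fuel j := by
  intro fuel
  induction fuel with
  | zero => intro j; exact le_refl j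
  | succ n ih =>
    intro j
    show (if j < B ∧ PySem.List.pyGetD s j 0 - x < d then pvWhileB s B d x n (j + 1) else j) ≥ j
    split
    · exact le_trans (by omega) (ih (j + 1))
    · exact le_refl j

-- every index the while loop skips satisfied its condition
lemma pvWhileB_skip (s : List Int) (B d x : Int) :
    ∀ (fuel : Nat) (j k : Int), j ≤ k → k < pvWhileB s B d x fuel j →
      k < B ∧ PySem.List.pyGetD s k 0 - x < d := by
  intro fuel
  induction fuel with
  | zero => intro j k hjk hk; exact absurd hk (by simp [pvWhileB]; omega)
  | succ n ih =>
    intro j k hjk hk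
    by_cases hc : j < B ∧ PySem.List.pyGetD s j 0 - x < d
    · rw [show pvWhileB s B d x (n + 1) j = pvWhileB s B d x n (j + 1) by
        simp [pvWhileB, hc]] at hk
      rcases eq_or_lt_of_le hjk with rfl | hlt
      · exact hc
      · exact ih (j + 1) k (by omega) hk
    · rw [show pvWhileB s B d x (n + 1) j = j by simp [pvWhileB]; intro h1 h2; exact absurd ⟨h1, h2⟩ hc] at hk
      omega

-- with enough fuel the while loop ends with its condition false
lemma pvWhileB_stop (s : List Int) (B d x : Int) :
    ∀ (fuel : Nat) (j : Int), B - j ≤ (fuel : Int) →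
      ¬(pvWhileB s B d x fuel j < B ∧ PySem.List.pyGetD s (pvWhileB s B d x fuel j) 0 - x < d) := by
  intro fuel
  induction fuel with
  | zero => intro j hf; simp [pvWhileB]; omega
  | succ n ih =>
    intro j hf
    by_cases hc : j < B ∧ PySem.List.pyGetD s j 0 - x < d
    · rw [show pvWhileB s B d x (n + 1) j = pvWhileB s B d x n (j + 1) by simp [pvWhileB, hc]]
      exact ih (j + 1) (by push_cast at hf ⊢; omega)
    · rw [show pvWhileB s B d x (n + 1) j = j by simp [pvWhileB]; intro h1 h2; exact absurd ⟨h1, h2⟩ hc]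
      exact hc

-- correctness of the outer two-pointer loop over i = i0 .. B-1 with carried pointer j0
lemma pvTemGo_iff (s : List Int) (B d : Int)
    (hmono : ∀ a b : Int, 0 ≤ a → a ≤ b → b < (s.length : Int) →
      PySem.List.pyGetD s a 0 ≤ PySem.List.pyGetD s b 0)
    (hB : B ≤ (s.length : Int)) :
    ∀ (n : Nat) (i0 j0 : Int), (B - i0).toNat = n → 0 ≤ i0 → 0 ≤ j0 →
      (∀ a b : Int, i0 ≤ a → a ≤ b → b < B →
        PySem.List.pyGetD s b 0 - PySem.List.pyGetD s a 0 = d → j0 ≤ b) →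
      (pvTemGo s B d (PySem.List.pyRange i0 B 1) j0 = true ↔
        ∃ a b : Int, i0 ≤ a ∧ a ≤ b ∧ b < B ∧
          PySem.List.pyGetD s b 0 - PySem.List.pyGetD s a 0 = d) := by
  intro n
  induction n with
  | zero =>
    intro i0 j0 hn hi0 hj0 hinv
    have hempty : PySem.List.pyRange i0 B 1 = [] := by
      have := PySem.List.length_pyRange_one i0 B
      exact List.eq_nil_of_length_eq_zero (by omega)
    rw [hempty]
    simp only [pvTemGo, Bool.false_eq_true, false_iff]
    rintro ⟨a, b, ha, hab, hbB, _⟩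
    omega
  | succ n ih =>
    intro i0 j0 hn hi0 hj0 hinv
    have hi0B : i0 < B := by omega
    rw [PySem.List.pyRange_one_cons hi0B]
    simp only [pvTemGo]
    set j1 : Int := if j0 < i0 then i0 else j0 with hj1def
    have hj1i : i0 ≤ j1 := by rw [hj1def]; split <;> omega
    have hj1j : j0 ≤ j1 := by rw [hj1def]; split <;> omega
    set x := PySem.List.pyGetD s i0 0 with hxdef
    set j2 : Int := pvWhileB s B d x (B - j1).toNat j1 with hj2def
    have hj12 : j1 ≤ j2 := pvWhileB_ge s B d x _ j1
    have hskip : ∀ k : Int, j1 ≤ k → k < j2 → k < B ∧ PySem.List.pyGetD s k 0 - x < d :=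
      fun k hk1 hk2 => pvWhileB_skip s B d x _ j1 k hk1 hk2
    have hstop : ¬(j2 < B ∧ PySem.List.pyGetD s j2 0 - x < d) :=
      pvWhileB_stop s B d x _ j1 (Int.self_le_toNat (B - j1))
    by_cases hc : j2 < B ∧ PySem.List.pyGetD s j2 0 - x = d
    · rw [if_pos hc]
      exact ⟨fun _ => ⟨i0, j2, le_refl i0, le_trans hj1i hj12, hc.1, hc.2⟩, fun _ => rfl⟩
    · rw [if_neg hc]
      -- no partner exists for i0 itself
      have hno : ∀ b : Int, i0 ≤ b → b < B → PySem.List.pyGetD s b 0 - x = d → False := by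
        intro b hib hbB heq
        have hbj0 : j0 ≤ b := hinv i0 b (le_refl i0) hib hbB heq
        have hbj1 : j1 ≤ b := by rw [hj1def]; split <;> omega
        have hbj2 : j2 ≤ b := by
          by_contra hlt
          exact absurd heq (by have := (hskip b hbj1 (by omega)).2; omega)
        have hs2b : PySem.List.pyGetD s j2 0 ≤ PySem.List.pyGetD s b 0 :=
          hmono j2 b (by omega) hbj2 (by omega)
        exact hc ⟨by omega, by omega⟩
      -- carried pointer stays below every remaining match
      have hinv' : ∀ a b : Int, i0 + 1 ≤ a → a ≤ b → b < B →
          PySem.List.pyGetD s b 0 - PySem.List.pyGetD s a 0 = d → j2 ≤ b := by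
        intro a b ha hab hbB heq
        have hbj0 : j0 ≤ b := hinv a b (by omega) hab hbB heq
        have hbj1 : j1 ≤ b := by rw [hj1def]; split <;> omega
        by_contra hlt
        have hlt2 := (hskip b hbj1 (by omega)).2
        have hxa : x ≤ PySem.List.pyGetD s a 0 := hmono i0 a hi0 (by omega) (by omega)
        omega
      rw [ih (i0 + 1) j2 (by omega) (by omega) (by omega) hinv']
      constructor
      · rintro ⟨a, b, ha, hab, hbB, heq⟩
        exact ⟨a, b, by omega, hab, hbB, heq⟩
      · rintro ⟨a, b, ha, hab, hbB, heq⟩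
        rcases eq_or_lt_of_le ha with rfl | hgt
        · exact absurd heq (by intro h; exact hno b hab hbB h)
        · exact ⟨a, b, by omega, hab, hbB, heq⟩

-- membership in the nested difference-building fold (A side)
lemma pv_mem_nested_foldl_add (f : Int → Int → Int) (g : Int → List Int) (L : List Int)
    (s : PySem.Set Int) (y : Int) :
    y ∈ L.foldl (fun acc i => (g i).foldl (fun acc2 j => PySem.Set.add acc2 (f i j)) acc) s ↔
      y ∈ s ∨ ∃ i ∈ L, ∃ j ∈ g i, y = f i j := by
  induction L generalizing s with
  | nil => simp
  | cons a L ih =>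
    simp only [List.foldl_cons, ih, PySem.Set.mem_foldl_add, List.mem_cons]
    constructor
    · rintro ((h | ⟨j, hj, rfl⟩) | ⟨i, hi, j, hj, rfl⟩)
      · exact Or.inl h
      · exact Or.inr ⟨a, Or.inl rfl, j, hj, rfl⟩
      · exact Or.inr ⟨i, Or.inr hi, j, hj, rfl⟩
    · rintro (h | ⟨i, (rfl | hi), j, hj, rfl⟩)
      · exact Or.inl (Or.inl h)
      · exact Or.inl (Or.inr ⟨j, hj, rfl⟩)
      · exact Or.inr ⟨i, hi, j, hj, rfl⟩

-- the two per-number conditions agree: d is in A's difference set iff B's sweep finds it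
lemma pv_cond_eq (s : List Int) (B : Int)
    (hmono : ∀ a b : Int, 0 ≤ a → a ≤ b → b < (s.length : Int) →
      PySem.List.pyGetD s a 0 ≤ PySem.List.pyGetD s b 0)
    (hB : B ≤ (s.length : Int)) (d : Int) :
    PySem.Set.contains
      ((PySem.List.pyRange 0 B 1).foldl
        (fun acc i => (PySem.List.pyRange i B 1).foldl
          (fun acc2 j => PySem.Set.add acc2
            (|PySem.List.pyGetD s i 0 - PySem.List.pyGetD s j 0|)) acc)
        PySem.Set.empty) d
    = pvTem s B d := by
  rw [Bool.eq_iff_iff]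
  rw [PySem.Set.contains_iff]
  rw [pv_mem_nested_foldl_add (fun i j => |PySem.List.pyGetD s i 0 - PySem.List.pyGetD s j 0|)
        (fun i => PySem.List.pyRange i B 1)]
  rw [show pvTem s B d = pvTemGo s B d (PySem.List.pyRange 0 B 1) 0 from rfl,
      pvTemGo_iff s B d hmono hB (B - 0).toNat 0 0 rfl (le_refl 0) (le_refl 0)
        (fun a b ha hab _ _ => by omega)]
  simp only [PySem.List.mem_pyRange_one, PySem.Set.empty, List.not_mem_nil, false_or]
  constructor
  · rintro ⟨i, ⟨hi0, hiB⟩, j, ⟨hij, hjB⟩, rfl⟩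
    refine ⟨i, j, hi0, hij, hjB, ?_⟩
    have hle : PySem.List.pyGetD s i 0 ≤ PySem.List.pyGetD s j 0 := hmono i j hi0 hij (by omega)
    rw [abs_sub_comm]
    exact (abs_of_nonneg (by omega)).symm
  · rintro ⟨a, b, ha, hab, hbB, heq⟩
    refine ⟨a, ⟨ha, by omega⟩, b, ⟨hab, hbB⟩, ?_⟩
    have hle : PySem.List.pyGetD s a 0 ≤ PySem.List.pyGetD s b 0 := hmono a b ha hab (by omega)
    rw [abs_sub_comm, ← heq]
    exact (abs_of_nonneg (by omega)).symm
  -- (the A-side set is PySem.Set.contains; contains_iff turns it into membership)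

-- the two early-return loops agree when their per-number conditions agree
lemma pv_check_eq (anunc : PySem.Set Int) (s : List Int) (B : Int)
    (h : ∀ e : Int, PySem.Set.contains anunc e = pvTem s B e) :
    ∀ (fuel : Nat) (d : Int), pvCheckA anunc fuel d = pvCheckB s B fuel d := by
  intro fuel
  induction fuel with
  | zero => intro d; rfl
  | succ n ih =>
    intro d
    show (if PySem.Set.contains anunc d then pvCheckA anunc n (d + 1) else "N")
        = (if pvTem s B d then pvCheckB s B n (d + 1) else "N")
    rw [h d]
    by_cases hc : pvTem s B d = true
    · rw [if_pos hc, if_pos hc]; exact ih (d + 1)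
    · rw [if_neg hc, if_neg hc]

-- the sorted list is monotone under pyGetD
lemma pv_sorted_mono (bolas : List Int) :
    ∀ a b : Int, 0 ≤ a → a ≤ b →
      b < ((PySem.List.sorted bolas (fun x => x) false).length : Int) →
      PySem.List.pyGetD (PySem.List.sorted bolas (fun x => x) false) a 0 ≤
        PySem.List.pyGetD (PySem.List.sorted bolas (fun x => x) false) b 0 := by
  intro a b ha hab hb
  rw [PySem.List.pyGetD_eq_getElem _ 0 ha (by omega),
      PySem.List.pyGetD_eq_getElem _ 0 (by omega) hb]
  exact PySem.List.sorted_id_getElem_mono bolas (by omega) (by omega)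

-- ===== VERDICT (by name: the statement is the Claim_ definition above) =====
theorem pode_anunciar_todos_numeros_spec : Claim_equal_pode_anunciar_todos_numeros := by
  intro N B bolas hdom hpre
  unfold Spec_pode_anunciar_todos_numeros
  simp only [pode_anunciar_todos_numeros, pode_anunciar_todos_numeros_alt]
  exact pv_check_eq _ _ B
    (fun e => pv_cond_eq _ B (pv_sorted_mono bolas)
      (by rw [PySem.List.length_sorted]; exact hpre) e)
    (N + 1).toNat 0
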